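-- pv_equiv track=rewrite | github.com/5nizza/party-elli | src/parsing/parser.py | _consume_new_lines_and_split_into_blocks
-- ===== SOURCE A (Python) =====
-- def _consume_new_lines_and_split_into_blocks(text):
--     new_text = []
--     splitted_text = [l for l in text.strip().split('\n') if l.strip() != '']
--
--     crt = splitted_text[0]
--     for l in splitted_text[1:]:
--         if 'INPUT' in l or 'OUTPUT' in l or 'PROPERTY' in l:
--             new_text.append(crt)
--             crt = l
--         else:
--             crt += ' ' + l
--
--     new_text.append(crt)
--
--     return [l for l in new_text if l != '']
-- ===== SOURCE B (Python) =====
-- def _split_rec(ls):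
--     # recursion on the line list, building blocks (as lists of lines) back-to-front
--     if not ls:
--         return [], []
--     pending, blocks = _split_rec(ls[1:])
--     l = ls[0]
--     if 'INPUT' in l or 'OUTPUT' in l or 'PROPERTY' in l:
--         return [], [[l] + pending] + blocks
--     return [l] + pending, blocks
--
--
-- def _consume_new_lines_and_split_into_blocks(text):
--     lines = [l for l in text.strip().split('\n') if l.strip() != '']
--     head, tail = lines[0], lines[1:]
--     pending, blocks = _split_rec(tail)
--     joined = [' '.join(g) for g in [[head] + pending] + blocks]
--     return [b for b in joined if b != '']
-- ===== Notes on version B (the rewrite author's own statement) =====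
-- stated objective: alternative
-- what changed: A's single left-to-right loop mutating a string accumulator is replaced by a structural recursion that groups the lines into blocks (lists of lines) back-to-front and joins each block with ' ' once at the end.
import Mathlib
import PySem

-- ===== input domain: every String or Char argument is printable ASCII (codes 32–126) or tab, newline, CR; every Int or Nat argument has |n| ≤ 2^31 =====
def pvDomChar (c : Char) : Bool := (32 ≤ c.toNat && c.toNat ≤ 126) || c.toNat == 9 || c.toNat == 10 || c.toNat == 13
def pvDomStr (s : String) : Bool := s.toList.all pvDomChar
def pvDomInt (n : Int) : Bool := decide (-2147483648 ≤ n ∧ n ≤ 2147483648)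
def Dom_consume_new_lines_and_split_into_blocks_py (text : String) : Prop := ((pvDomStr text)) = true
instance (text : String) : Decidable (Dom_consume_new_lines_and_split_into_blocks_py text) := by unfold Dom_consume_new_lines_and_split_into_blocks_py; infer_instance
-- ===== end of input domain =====

-- B re-decomposes A's left-to-right accumulator loop as a structural recursion that
-- groups the lines back-to-front into blocks (lists of lines) and joins each block once
-- at the end (objective: alternative decomposition, same cost).

-- shared by both sources verbatim: "'INPUT' in l or 'OUTPUT' in l or 'PROPERTY' in l"
def pvHasKeyword (l : List Char) : Bool :=
  PySem.Chars.isIn "INPUT".toList l || PySem.Chars.isIn "OUTPUT".toList l ||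
    PySem.Chars.isIn "PROPERTY".toList l

-- ===== PORT A =====
def consume_new_lines_and_split_into_blocks_py (text : String) : List String :=
  -- splitted_text = [l for l in text.strip().split('\n') if l.strip() != '']
  let splitted := (PySem.Chars.splitOn (PySem.Chars.strip text.toList) ['\n']).filter
      (fun l => decide (PySem.Chars.strip l ≠ []))
  match splitted with
  | [] => []  -- Python raises IndexError on splitted_text[0]; excluded by Pre_
  | crt0 :: rest =>
    -- for l in splitted_text[1:]: accumulate (new_text, crt)
    let st := rest.foldl
      (fun (st : List (List Char) × List Char) l =>
        if pvHasKeyword l then (st.1 ++ [st.2], l) else (st.1, st.2 ++ ' ' :: l))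
      ([], crt0)
    ((st.1 ++ [st.2]).filter (fun l => decide (l ≠ []))).map String.ofList

-- ===== PORT B =====
-- _split_rec: recursion on the tail, building (pending, blocks) back-to-front
def pvSplitRec (ls : List (List Char)) : List (List Char) × List (List (List Char)) :=
  match ls with
  | [] => ([], [])
  | l :: rest =>
    let pb := pvSplitRec rest
    if pvHasKeyword l then ([], (l :: pb.1) :: pb.2) else (l :: pb.1, pb.2)

def consume_new_lines_and_split_into_blocks_py_alt (text : String) : List String :=
  let lines := (PySem.Chars.splitOn (PySem.Chars.strip text.toList) ['\n']).filter
      (fun l => decide (PySem.Chars.strip l ≠ []))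
  match lines with
  | [] => []  -- lines[0] raises IndexError in Python; excluded by Pre_
  | head :: tail =>
    let pb := pvSplitRec tail
    let joined := ((head :: pb.1) :: pb.2).map (fun g => PySem.Chars.join [' '] g)
    (joined.filter (fun b => decide (b ≠ []))).map String.ofList

-- ===== PRECONDITION & SPEC =====
-- Pre_ excludes whitespace-only text, on which both Pythons raise IndexError (splitted_text[0] / lines[0]).
def Pre_consume_new_lines_and_split_into_blocks_py (text : String) : Prop :=
  PySem.Str.strip text ≠ ""
instance (text : String) : Decidable (Pre_consume_new_lines_and_split_into_blocks_py text) := by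
  unfold Pre_consume_new_lines_and_split_into_blocks_py; infer_instance

def pvWitness_consume_new_lines_and_split_into_blocks_py : String := "INPUT a b\nc d\nOUTPUT e"

def Spec_consume_new_lines_and_split_into_blocks_py (text : String) (out : List String) : Prop := out = consume_new_lines_and_split_into_blocks_py_alt text
instance (text : String) (out : List String) : Decidable (Spec_consume_new_lines_and_split_into_blocks_py text out) := by unfold Spec_consume_new_lines_and_split_into_blocks_py; infer_instance

-- ===== CLAIM (what is proved, stated in full; the proofs are below) =====
def Claim_equal_consume_new_lines_and_split_into_blocks_py : Prop := ∀ (text : String), Dom_consume_new_lines_and_split_into_blocks_py text → Pre_consume_new_lines_and_split_into_blocks_py text → Spec_consume_new_lines_and_split_into_blocks_py text (consume_new_lines_and_split_into_blocks_py text)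

-- ===== LEMMAS AND PROOFS =====

-- the block list A's loop builds, as a recursion on the remaining lines
def pvG (crt : List Char) : List (List Char) → List (List Char)
  | [] => [crt]
  | l :: ls => if pvHasKeyword l then crt :: pvG l ls else pvG (crt ++ ' ' :: l) ls

theorem pvFoldA (ls : List (List Char)) (acc : List (List Char)) (crt : List Char) :
    (ls.foldl
      (fun (st : List (List Char) × List Char) l =>
        if pvHasKeyword l then (st.1 ++ [st.2], l) else (st.1, st.2 ++ ' ' :: l))
      (acc, crt)).1 ++
      [(ls.foldl
        (fun (st : List (List Char) × List Char) l =>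
          if pvHasKeyword l then (st.1 ++ [st.2], l) else (st.1, st.2 ++ ' ' :: l))
        (acc, crt)).2] = acc ++ pvG crt ls := by
  induction ls generalizing acc crt with
  | nil => simp [pvG]
  | cons l ls ih =>
    by_cases h : pvHasKeyword l = true
    · simp [pvG, h, ih]
    · simp only [List.foldl_cons, pvG, h]
      simp [ih]

theorem pvJoin_absorb (x l : List Char) (p : List (List Char)) :
    PySem.Chars.join [' '] ((x ++ ' ' :: l) :: p) = x ++ ' ' :: PySem.Chars.join [' '] (l :: p) := by
  cases p with
  | nil => simp [PySem.Chars.join_singleton]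
  | cons q qs =>
    rw [PySem.Chars.join_cons_cons, PySem.Chars.join_cons_cons]
    simp

theorem pvG_join (ls : List (List Char)) (crt : List Char) :
    pvG crt ls =
      PySem.Chars.join [' '] (crt :: (pvSplitRec ls).1) ::
        (pvSplitRec ls).2.map (fun g => PySem.Chars.join [' '] g) := by
  induction ls generalizing crt with
  | nil => simp [pvG, pvSplitRec, PySem.Chars.join_singleton]
  | cons l ls ih =>
    by_cases h : pvHasKeyword l = true
    · simp [pvG, pvSplitRec, h, ih, PySem.Chars.join_singleton]
    · simp only [pvG, pvSplitRec, h, if_neg, Bool.false_eq_true, not_false_eq_true]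
      rw [ih, pvJoin_absorb, PySem.Chars.join_cons_cons]
      simp

-- ===== VERDICT (by name: the statement is the Claim_ definition above) =====
theorem consume_new_lines_and_split_into_blocks_py_spec : Claim_equal_consume_new_lines_and_split_into_blocks_py := by
  intro text _ _
  unfold Spec_consume_new_lines_and_split_into_blocks_py
  unfold consume_new_lines_and_split_into_blocks_py consume_new_lines_and_split_into_blocks_py_alt
  cases h : (PySem.Chars.splitOn (PySem.Chars.strip text.toList) ['\n']).filter
      (fun l => decide (PySem.Chars.strip l ≠ [])) with
  | nil => rfl
  | cons crt0 rest =>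
    simp only []
    rw [pvFoldA rest [] crt0, List.nil_append, pvG_join]
    simp
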